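-- pv_equiv track=rewrite | github.com/mynamlachi/Custom-Hash-Function-Implementation-and-Comparison | custom_hash.py | hamming_distance_hex
-- ===== SOURCE A (Python) =====
-- def hamming_distance_hex(h1: str, h2: str) -> int:
--     b1 = bytes.fromhex(h1)
--     b2 = bytes.fromhex(h2)
--     L = max(len(b1), len(b2))
--     b1 = b1.ljust(L, b'\x00')
--     b2 = b2.ljust(L, b'\x00')
--     dist = 0
--     for x,y in zip(b1,b2):
--         dist += bin(x ^ y).count('1')
--     return dist
-- ===== SOURCE B (Python) =====
-- _HEX = "0123456789abcdefABCDEF"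
--
-- def hamming_distance_hex(h1: str, h2: str) -> int:
--     def parse(h):
--         s = "".join(h.split())
--         if len(s) % 2 or any(c not in _HEX for c in s):
--             raise ValueError("non-hexadecimal number found in fromhex() arg")
--         return (int(s, 16) if s else 0), len(s) // 2
--     n1, l1 = parse(h1)
--     n2, l2 = parse(h2)
--     L = max(l1, l2)
--     return ((n1 << (8 * (L - l1))) ^ (n2 << (8 * (L - l2)))).bit_count()
-- ===== Notes on version B (the rewrite author's own statement) =====
-- stated objective: alternative
-- what changed: B never builds byte sequences: it strips whitespace, validates the hex digits, parses each string directly into one big integer (with a digit count for the right-padding shift), XORs the two integers and takes a single popcount, replacing A's fromhex/ljust/zip per-byte loop with bin() string counting.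
import Mathlib
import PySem

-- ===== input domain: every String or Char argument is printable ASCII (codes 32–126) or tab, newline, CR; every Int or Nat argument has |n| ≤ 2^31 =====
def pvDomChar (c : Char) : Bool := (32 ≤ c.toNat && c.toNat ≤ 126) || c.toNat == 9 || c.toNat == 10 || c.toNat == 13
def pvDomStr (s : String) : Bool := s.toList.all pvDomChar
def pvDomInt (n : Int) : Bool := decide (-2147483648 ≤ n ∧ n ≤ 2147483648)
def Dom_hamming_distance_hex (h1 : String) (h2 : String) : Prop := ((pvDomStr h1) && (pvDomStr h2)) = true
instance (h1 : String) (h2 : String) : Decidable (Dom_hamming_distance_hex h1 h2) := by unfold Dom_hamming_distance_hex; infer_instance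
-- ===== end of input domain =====

-- B replaces A's byte-sequence pipeline (fromhex to bytes, ljust, per-byte XOR with bin() string
-- counting) by parsing each hex string directly into one big integer, a whole-integer XOR and a
-- single popcount (objective: alternative). Return values only; neither version mutates input.

-- ===== PORT A =====
-- bytes.fromhex — Python 3.11 skips ASCII whitespace between byte pairs; a pair is
-- two adjacent hex digits; none = ValueError. Exact on the stated domain (hand-ported).
def pvHexVal? (c : Char) : Option Nat :=
  if '0' ≤ c ∧ c ≤ '9' then some (c.toNat - 48)
  else if 'a' ≤ c ∧ c ≤ 'f' then some (c.toNat - 87)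
  else if 'A' ≤ c ∧ c ≤ 'F' then some (c.toNat - 55)
  else none

def pvIsAsciiSpace (c : Char) : Bool := c.toNat == 32 || (9 ≤ c.toNat && c.toNat ≤ 13)

def pvFromHex? : List Char → Option (List Nat)
  | [] => some []
  | c :: rest =>
    if pvIsAsciiSpace c then pvFromHex? rest
    else match pvHexVal? c with
      | none => none
      | some hi =>
        match rest with
        | [] => none
        | d :: rest' =>
          match pvHexVal? d with
          | none => none
          | some lo => (pvFromHex? rest').map (fun bs => (hi * 16 + lo) :: bs)

-- Python bin(n): "0b" + binary digits ("0b0" for 0)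
def pvBinDigits (n : Nat) : List Char :=
  if h : n = 0 then []
  else pvBinDigits (n / 2) ++ [if n % 2 = 1 then '1' else '0']
decreasing_by exact Nat.div_lt_self (Nat.pos_of_ne_zero h) (by norm_num)

def pvBin (n : Nat) : List Char := ['0', 'b'] ++ (if n = 0 then ['0'] else pvBinDigits n)

def hamming_distance_hex (h1 : String) (h2 : String) : Int :=
  match pvFromHex? h1.toList, pvFromHex? h2.toList with
  | some b1, some b2 =>
    let L := max b1.length b2.length
    let b1 := b1 ++ List.replicate (L - b1.length) 0   -- b1.ljust(L, b'\x00')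
    let b2 := b2 ++ List.replicate (L - b2.length) 0
    (b1.zip b2).foldl (fun dist xy => dist + (((pvBin (xy.1 ^^^ xy.2)).count '1' : Nat) : Int)) 0
  | _, _ => 0   -- unreachable under Pre_ (ValueError in Python)

-- ===== PORT B =====
-- str.split() whitespace test (on the ASCII domain)
def pvIsWs (c : Char) : Bool := c.toNat == 32 || (9 ≤ c.toNat && c.toNat ≤ 13)

-- membership in B's _HEX digit string
def pvIsHexDigitB (c : Char) : Bool :=
  ('0' ≤ c && c ≤ '9') || ('a' ≤ c && c ≤ 'f') || ('A' ≤ c && c ≤ 'F')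

-- a validated hex digit's value (callers guarantee pvIsHexDigitB)
def pvNibValB (c : Char) : Nat :=
  if c ≤ '9' then c.toNat - 48 else if 'a' ≤ c then c.toNat - 87 else c.toNat - 55

-- int.bit_count()
def pvPopcount (n : Nat) : Nat :=
  if h : n = 0 then 0
  else n % 2 + pvPopcount (n / 2)
decreasing_by exact Nat.div_lt_self (Nat.pos_of_ne_zero h) (by norm_num)

def hamming_distance_hex_alt (h1 : String) (h2 : String) : Int :=
  let s1 := h1.toList.filter (fun c => !pvIsWs c)    -- "".join(h1.split())
  let s2 := h2.toList.filter (fun c => !pvIsWs c)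
  if (s1.length % 2 != 0) || !(s1.all pvIsHexDigitB) then 0   -- ValueError; unreachable under Pre_
  else if (s2.length % 2 != 0) || !(s2.all pvIsHexDigitB) then 0   -- ValueError; unreachable under Pre_
  else
    let n1 := s1.foldl (fun n c => n * 16 + pvNibValB c) 0   -- int(s1, 16) (0 when s1 is empty)
    let n2 := s2.foldl (fun n c => n * 16 + pvNibValB c) 0
    let l1 := s1.length / 2
    let l2 := s2.length / 2
    let L := max l1 l2
    ((pvPopcount ((n1 <<< (8 * (L - l1))) ^^^ (n2 <<< (8 * (L - l2)))) : Nat) : Int)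

-- ===== PRECONDITION & SPEC =====
-- Pre_-side character classes (independent of both ports)
def pvIsSpaceP (c : Char) : Bool := c.toNat == 32 || (9 ≤ c.toNat && c.toNat ≤ 13)

def pvIsHexP (c : Char) : Bool :=
  if '0' ≤ c ∧ c ≤ '9' then true
  else if 'a' ≤ c ∧ c ≤ 'f' then true
  else if 'A' ≤ c ∧ c ≤ 'F' then true
  else false

-- well-formed hex string: ASCII whitespace between pairs of hex digits (the shape bytes.fromhex accepts)
def pvValidHex : List Char → Bool
  | [] => true
  | c :: rest =>
    if pvIsSpaceP c then pvValidHex rest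
    else if pvIsHexP c then
      match rest with
      | [] => false
      | d :: rest' => pvIsHexP d && pvValidHex rest'
    else false

-- Pre_ excludes exactly the inputs where A's bytes.fromhex raises ValueError (an odd run of hex
-- digits or a non-hex, non-whitespace character).
def Pre_hamming_distance_hex (h1 : String) (h2 : String) : Prop :=
  pvValidHex h1.toList = true ∧ pvValidHex h2.toList = true
instance (h1 : String) (h2 : String) : Decidable (Pre_hamming_distance_hex h1 h2) := by
  unfold Pre_hamming_distance_hex; infer_instance

def pvWitness_hamming_distance_hex : String × String := ("ab", "0f 3C")

def Spec_hamming_distance_hex (h1 : String) (h2 : String) (out : Int) : Prop := out = hamming_distance_hex_alt h1 h2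
instance (h1 : String) (h2 : String) (out : Int) : Decidable (Spec_hamming_distance_hex h1 h2 out) := by unfold Spec_hamming_distance_hex; infer_instance

-- ===== CLAIM (what is proved, stated in full; the proofs are below) =====
def Claim_equal_hamming_distance_hex : Prop := ∀ (h1 : String) (h2 : String), Dom_hamming_distance_hex h1 h2 → Pre_hamming_distance_hex h1 h2 → Spec_hamming_distance_hex h1 h2 (hamming_distance_hex h1 h2)

-- ===== LEMMAS AND PROOFS =====

-- proof-only helper: int.from_bytes(bs, 'big'), the value A's byte list denotes
def pvIntFromBytesBE (bs : List Nat) : Nat := bs.foldl (fun n b => n * 256 + b) 0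

-- pvPopcount unfolding equation, valid for every n (also n = 0)
theorem pvPopcount_eq (n : Nat) : pvPopcount n = n % 2 + pvPopcount (n / 2) := by
  by_cases h : n = 0
  · subst h; simp [pvPopcount]
  · rw [pvPopcount]; simp [h]

-- counting '1' in Python's bin string is popcount
theorem count_binDigits (n : Nat) : (pvBinDigits n).count '1' = pvPopcount n := by
  induction n using Nat.strong_induction_on with
  | _ n ih =>
    by_cases h : n = 0
    · subst h; simp [pvBinDigits, pvPopcount]
    · rw [pvBinDigits, pvPopcount]
      simp only [h, dite_false, List.count_append]
      rw [ih (n / 2) (Nat.div_lt_self (Nat.pos_of_ne_zero h) (by norm_num))]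
      rcases Nat.mod_two_eq_zero_or_one n with h2 | h2 <;> simp [h2] <;> omega

theorem pvPopcount_zero : pvPopcount 0 = 0 := by rw [pvPopcount]; rfl

theorem count_pvBin (n : Nat) : (pvBin n).count '1' = pvPopcount n := by
  by_cases h : n = 0
  · subst h; rw [pvPopcount_zero]; rfl
  · rw [pvBin, if_neg h, List.count_append, count_binDigits,
      show List.count '1' ['0', 'b'] = 0 by decide, Nat.zero_add]

-- XOR splits along a 2^k boundary
theorem xor_split (k a b r s : Nat) (hr : r < 2 ^ k) (hs : s < 2 ^ k) :
    (a * 2 ^ k + r) ^^^ (b * 2 ^ k + s) = (a ^^^ b) * 2 ^ k + (r ^^^ s) := by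
  apply Nat.eq_of_testBit_eq
  intro j
  rw [Nat.testBit_xor,
      show a * 2 ^ k + r = 2 ^ k * a + r by ring_nf,
      show b * 2 ^ k + s = 2 ^ k * b + s by ring_nf,
      show (a ^^^ b) * 2 ^ k + (r ^^^ s) = 2 ^ k * (a ^^^ b) + (r ^^^ s) by ring_nf,
      Nat.testBit_two_pow_mul_add _ hr, Nat.testBit_two_pow_mul_add _ hs,
      Nat.testBit_two_pow_mul_add _ (Nat.xor_lt_two_pow hr hs)]
  by_cases hj : j < k <;> simp [hj, Nat.testBit_xor]

-- popcount splits along a 2^k boundary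
theorem popcount_split (k : Nat) : ∀ a r : Nat, r < 2 ^ k →
    pvPopcount (a * 2 ^ k + r) = pvPopcount a + pvPopcount r := by
  induction k with
  | zero =>
    intro a r hr
    have hr0 : r = 0 := by omega
    subst hr0
    rw [show a * 2 ^ 0 + 0 = a by ring, pvPopcount_zero, Nat.add_zero]
  | succ k ih =>
    intro a r hr
    rw [pvPopcount_eq (a * 2 ^ (k + 1) + r)]
    have hmod : (a * 2 ^ (k + 1) + r) % 2 = r % 2 := by
      have : a * 2 ^ (k + 1) = (a * 2 ^ k) * 2 := by ring
      omega
    have hdiv : (a * 2 ^ (k + 1) + r) / 2 = a * 2 ^ k + r / 2 := by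
      have : a * 2 ^ (k + 1) = (a * 2 ^ k) * 2 := by ring
      omega
    rw [hmod, hdiv, ih a (r / 2) (by omega), pvPopcount_eq r]
    omega

-- foldl of int.from_bytes with a seed shifts the seed
theorem fromBytes_foldl_shift (bs : List Nat) : ∀ a : Nat,
    bs.foldl (fun n b => n * 256 + b) a = a * 256 ^ bs.length + pvIntFromBytesBE bs := by
  induction bs with
  | nil => intro a; simp [pvIntFromBytesBE]
  | cons x t ih =>
    intro a
    simp only [List.foldl_cons, List.length_cons, pvIntFromBytesBE]
    rw [ih (a * 256 + x), ih (0 * 256 + x)]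
    simp only [pvIntFromBytesBE]
    ring

theorem fromBytes_cons (x : Nat) (t : List Nat) :
    pvIntFromBytesBE (x :: t) = x * 256 ^ t.length + pvIntFromBytesBE t := by
  calc pvIntFromBytesBE (x :: t)
      = List.foldl (fun n b => n * 256 + b) (0 * 256 + x) t := rfl
    _ = (0 * 256 + x) * 256 ^ t.length + pvIntFromBytesBE t := fromBytes_foldl_shift t _
    _ = x * 256 ^ t.length + pvIntFromBytesBE t := by ring

theorem fromBytes_lt (bs : List Nat) (h : ∀ b ∈ bs, b < 256) :
    pvIntFromBytesBE bs < 256 ^ bs.length := by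
  induction bs with
  | nil => simp [pvIntFromBytesBE]
  | cons x t ih =>
    rw [fromBytes_cons]
    have hx : x < 256 := h x (by simp)
    have ht := ih (fun b hb => h b (by simp [hb]))
    have hmul : x * 256 ^ t.length ≤ 255 * 256 ^ t.length :=
      Nat.mul_le_mul_right _ (by omega)
    simp only [List.length_cons, pow_succ]
    omega

theorem pow256 (p : Nat) : (256 : Nat) ^ p = 2 ^ (8 * p) := by
  rw [show (256 : Nat) = 2 ^ 8 by norm_num, ← pow_mul]

theorem fromBytes_pad (bs : List Nat) (p : Nat) :
    pvIntFromBytesBE (bs ++ List.replicate p 0) = pvIntFromBytesBE bs * 256 ^ p := by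
  induction p with
  | zero => simp
  | succ p ih =>
    rw [List.replicate_succ', ← List.append_assoc]
    calc pvIntFromBytesBE ((bs ++ List.replicate p 0) ++ [0])
        = pvIntFromBytesBE (bs ++ List.replicate p 0) * 256 + 0 := by
          simp [pvIntFromBytesBE, List.foldl_append]
      _ = (pvIntFromBytesBE bs * 256 ^ p) * 256 + 0 := by rw [ih]
      _ = pvIntFromBytesBE bs * 256 ^ (p + 1) := by ring

-- hex digits parse to values < 16
theorem pvHexVal?_lt (c : Char) (v : Nat) (h : pvHexVal? c = some v) : v < 16 := by
  unfold pvHexVal? at h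
  split_ifs at h with h1 h2 h3 <;> simp only [Option.some.injEq] at h <;> subst h
  · have : c.toNat ≤ 57 := by
      have := h1.2
      simp only [Char.le_def, UInt32.le_iff_toNat_le] at this
      exact this
    omega
  · have : c.toNat ≤ 102 := by
      have := h2.2
      simp only [Char.le_def, UInt32.le_iff_toNat_le] at this
      exact this
    have : 97 ≤ c.toNat := by
      have := h2.1
      simp only [Char.le_def, UInt32.le_iff_toNat_le] at this
      exact this
    omega
  · have : c.toNat ≤ 70 := by
      have := h3.2
      simp only [Char.le_def, UInt32.le_iff_toNat_le] at this
      exact this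
    have : 65 ≤ c.toNat := by
      have := h3.1
      simp only [Char.le_def, UInt32.le_iff_toNat_le] at this
      exact this
    omega

-- bytes produced by fromhex are < 256
theorem fromHex_bytes_lt_aux : ∀ (n : Nat) (cs : List Char), cs.length ≤ n →
    ∀ bs, pvFromHex? cs = some bs → ∀ b ∈ bs, b < 256 := by
  intro n
  induction n with
  | zero =>
    intro cs hl bs h
    have : cs = [] := List.eq_nil_of_length_eq_zero (by omega)
    subst this
    simp only [pvFromHex?, Option.some.injEq] at h
    subst h
    simp
  | succ n ih =>
    intro cs hl bs h
    cases cs with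
    | nil =>
      simp only [pvFromHex?, Option.some.injEq] at h
      subst h
      simp
    | cons c rest =>
      rw [pvFromHex?] at h
      by_cases sp : pvIsAsciiSpace c
      · rw [if_pos sp] at h
        exact ih rest (by simp at hl; omega) bs h
      · rw [if_neg sp] at h
        split at h
        · exact absurd h (by simp)
        · rename_i hi hhi
          split at h
          · exact absurd h (by simp)
          · rename_i d rest'
            split at h
            · exact absurd h (by simp)
            · rename_i lo hlo
              simp only [Option.map_eq_some_iff] at h
              obtain ⟨t, ht, rfl⟩ := h
              intro b hb
              rcases List.mem_cons.mp hb with rfl | hbt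
              · have hhi' := pvHexVal?_lt c hi hhi
                have hlo' := pvHexVal?_lt d lo hlo
                omega
              · refine ih rest' ?_ t ht b hbt
                simp at hl
                omega

theorem fromHex_bytes_lt (cs : List Char) (bs : List Nat) (h : pvFromHex? cs = some bs) :
    ∀ b ∈ bs, b < 256 :=
  fromHex_bytes_lt_aux cs.length cs le_rfl bs h

-- the central identity: byte-wise popcount of XOR = popcount of whole-integer XOR
theorem zip_popcount_eq : ∀ (b1 b2 : List Nat), b1.length = b2.length →
    (∀ b ∈ b1, b < 256) → (∀ b ∈ b2, b < 256) →
    ((b1.zip b2).map (fun xy => pvPopcount (xy.1 ^^^ xy.2))).sum =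
      pvPopcount (pvIntFromBytesBE b1 ^^^ pvIntFromBytesBE b2) := by
  intro b1
  induction b1 with
  | nil =>
    intro b2 hlen _ _
    have : b2 = [] := List.eq_nil_of_length_eq_zero hlen.symm
    subst this
    simp only [List.zip_nil_left, List.map_nil, List.sum_nil]
    rw [show pvIntFromBytesBE [] ^^^ pvIntFromBytesBE [] = 0 by rfl, pvPopcount_zero]
  | cons x t1 ih =>
    intro b2 hlen h1 h2
    rcases b2 with _ | ⟨y, t2⟩
    · simp at hlen
    · have hlen' : t1.length = t2.length := by simpa using hlen
      have hx : x < 256 := h1 x (by simp)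
      have hy : y < 256 := h2 y (by simp)
      have ht1 : ∀ b ∈ t1, b < 256 := fun b hb => h1 b (by simp [hb])
      have ht2 : ∀ b ∈ t2, b < 256 := fun b hb => h2 b (by simp [hb])
      have hF1 : pvIntFromBytesBE t1 < 2 ^ (8 * t1.length) := by
        rw [← pow256]; exact fromBytes_lt t1 ht1
      have hF2 : pvIntFromBytesBE t2 < 2 ^ (8 * t1.length) := by
        rw [← pow256, hlen']; exact fromBytes_lt t2 ht2
      rw [fromBytes_cons, fromBytes_cons, hlen', ← hlen']
      rw [show (256 : Nat) ^ t1.length = 2 ^ (8 * t1.length) from pow256 _]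
      rw [xor_split (8 * t1.length) x y _ _ hF1 hF2]
      rw [popcount_split (8 * t1.length) (x ^^^ y) _ (Nat.xor_lt_two_pow hF1 hF2)]
      simp only [List.zip_cons_cons, List.map_cons, List.sum_cons]
      rw [ih t2 hlen' ht1 ht2]

-- the Pre_ scanner accepts exactly the strings A's parser parses
theorem pvIsHexP_eq (c : Char) : pvIsHexP c = (pvHexVal? c).isSome := by
  unfold pvIsHexP pvHexVal?
  split_ifs <;> rfl

theorem validHex_eq_aux : ∀ (n : Nat) (cs : List Char), cs.length ≤ n →
    pvValidHex cs = (pvFromHex? cs).isSome := by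
  intro n
  induction n with
  | zero =>
    intro cs hl
    have : cs = [] := List.eq_nil_of_length_eq_zero (by omega)
    subst this; rfl
  | succ n ih =>
    intro cs hl
    cases cs with
    | nil => rfl
    | cons c rest =>
      rw [pvValidHex.eq_def, pvFromHex?]
      dsimp only
      rw [show pvIsSpaceP = pvIsAsciiSpace from rfl]
      by_cases sp : pvIsAsciiSpace c = true
      · rw [if_pos sp, if_pos sp]
        exact ih rest (by simp at hl; omega)
      · rw [if_neg sp, if_neg sp]
        rw [pvIsHexP_eq]
        cases pvHexVal? c with
        | none => rfl
        | some hi =>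
          dsimp only [Option.isSome]
          rw [if_pos rfl]
          cases rest with
          | nil => rfl
          | cons d rest' =>
            dsimp only
            rw [pvIsHexP_eq]
            cases pvHexVal? d with
            | none => rfl
            | some lo =>
              rw [ih rest' (by simp at hl; omega)]
              cases pvFromHex? rest' <;> rfl

theorem validHex_eq (cs : List Char) : pvValidHex cs = (pvFromHex? cs).isSome :=
  validHex_eq_aux cs.length cs le_rfl

-- A's Int foldl is the Nat sum of per-pair popcounts, cast to Int
theorem foldl_count_eq_sum (l : List (Nat × Nat)) :
    l.foldl (fun dist xy => dist + (((pvBin (xy.1 ^^^ xy.2)).count '1' : Nat) : Int)) 0 =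
      ((l.map (fun xy => pvPopcount (xy.1 ^^^ xy.2))).sum : Nat) := by
  have hfun : (fun (dist : Int) (xy : Nat × Nat) =>
        dist + (((pvBin (xy.1 ^^^ xy.2)).count '1' : Nat) : Int)) =
      (fun dist xy => dist + ((pvPopcount (xy.1 ^^^ xy.2) : Nat) : Int)) := by
    funext d xy; rw [count_pvBin]
  have hadd := PySem.List.foldl_add (l := l) (a := (0 : Int))
    (g := fun xy : Nat × Nat => ((pvPopcount (xy.1 ^^^ xy.2) : Nat) : Int))
  rw [hfun, hadd]
  simp [Nat.cast_list_sum, List.map_map, Function.comp_def]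

-- a hex digit recognised by A's pvHexVal? passes B's digit test, has B's value, and is not whitespace
theorem pvHexDigit_props (c : Char) (v : Nat) (h : pvHexVal? c = some v) :
    pvIsHexDigitB c = true ∧ pvNibValB c = v ∧ pvIsWs c = false := by
  have e0 : ('0' : Char).val.toNat = 48 := by decide
  have e9 : ('9' : Char).val.toNat = 57 := by decide
  have ea : ('a' : Char).val.toNat = 97 := by decide
  have ef : ('f' : Char).val.toNat = 102 := by decide
  have eA : ('A' : Char).val.toNat = 65 := by decide
  have eF : ('F' : Char).val.toNat = 70 := by decide
  unfold pvHexVal? at h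
  split_ifs at h with g1 g2 g3 <;> simp only [Option.some.injEq] at h <;> subst h
  · obtain ⟨ha, hb⟩ := g1
    have ha' := ha; have hb' := hb
    rw [Char.le_def, UInt32.le_iff_toNat_le] at ha' hb'
    refine ⟨by simp [pvIsHexDigitB, ha, hb], by simp [pvNibValB, hb], ?_⟩
    unfold pvIsWs Char.toNat
    simp only [Bool.or_eq_false_iff, Bool.and_eq_false_iff,
      beq_eq_false_iff_ne, ne_eq, decide_eq_false_iff_not]
    omega
  · obtain ⟨ha, hb⟩ := g2
    have ha' := ha; have hb' := hb
    rw [Char.le_def, UInt32.le_iff_toNat_le] at ha' hb'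
    have h9 : ¬ (c ≤ '9') := by
      rw [Char.le_def, UInt32.le_iff_toNat_le]; omega
    refine ⟨by simp [pvIsHexDigitB, ha, hb], by simp [pvNibValB, h9, ha], ?_⟩
    unfold pvIsWs Char.toNat
    simp only [Bool.or_eq_false_iff, Bool.and_eq_false_iff,
      beq_eq_false_iff_ne, ne_eq, decide_eq_false_iff_not]
    omega
  · obtain ⟨ha, hb⟩ := g3
    have ha' := ha; have hb' := hb
    rw [Char.le_def, UInt32.le_iff_toNat_le] at ha' hb'
    have h9 : ¬ (c ≤ '9') := by
      rw [Char.le_def, UInt32.le_iff_toNat_le]; omega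
    have hna : ¬ ('a' ≤ c) := by
      rw [Char.le_def, UInt32.le_iff_toNat_le]; omega
    refine ⟨by simp [pvIsHexDigitB, ha, hb], by simp [pvNibValB, h9, hna], ?_⟩
    unfold pvIsWs Char.toNat
    simp only [Bool.or_eq_false_iff, Bool.and_eq_false_iff,
      beq_eq_false_iff_ne, ne_eq, decide_eq_false_iff_not]
    omega

-- relating B's strip-validate-parse to A's byte list: when fromhex succeeds, the stripped string
-- has twice as many characters as there are bytes, all of them hex digits, and B's fold parses it
-- to the bytes' big-endian value
theorem strip_parse_aux : ∀ (n : Nat) (cs : List Char), cs.length ≤ n →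
    ∀ bs, pvFromHex? cs = some bs →
    (cs.filter (fun c => !pvIsWs c)).length = 2 * bs.length ∧
    (cs.filter (fun c => !pvIsWs c)).all pvIsHexDigitB = true ∧
    ∀ a : Nat, (cs.filter (fun c => !pvIsWs c)).foldl (fun m c => m * 16 + pvNibValB c) a =
      a * 256 ^ bs.length + pvIntFromBytesBE bs := by
  intro n
  induction n with
  | zero =>
    intro cs hl bs h
    have : cs = [] := List.eq_nil_of_length_eq_zero (by omega)
    subst this
    simp only [pvFromHex?, Option.some.injEq] at h
    subst h
    exact ⟨rfl, rfl, fun a => by simp [pvIntFromBytesBE]⟩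
  | succ n ih =>
    intro cs hl bs h
    cases cs with
    | nil =>
      simp only [pvFromHex?, Option.some.injEq] at h
      subst h
      exact ⟨rfl, rfl, fun a => by simp [pvIntFromBytesBE]⟩
    | cons c rest =>
      rw [pvFromHex?] at h
      by_cases sp : pvIsAsciiSpace c
      · rw [if_pos sp] at h
        have hws : pvIsWs c = true := sp
        have := ih rest (by simp at hl; omega) bs h
        simpa [hws] using this
      · rw [if_neg sp] at h
        split at h
        · exact absurd h (by simp)
        · rename_i hi hhi
          split at h
          · exact absurd h (by simp)
          · rename_i d rest'
            split at h
            · exact absurd h (by simp)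
            · rename_i lo hlo
              simp only [Option.map_eq_some_iff] at h
              obtain ⟨t, ht, rfl⟩ := h
              obtain ⟨hcx, hcv, hcws⟩ := pvHexDigit_props c hi hhi
              obtain ⟨hdx, hdv, hdws⟩ := pvHexDigit_props d lo hlo
              obtain ⟨hlt, hat, hpt⟩ := ih rest' (by simp at hl; omega) t ht
              have hfilter : (c :: d :: rest').filter (fun c => !pvIsWs c) =
                  c :: d :: rest'.filter (fun c => !pvIsWs c) := by
                simp [hcws, hdws]
              refine ⟨by simp [hfilter, hlt]; omega,
                      by rw [hfilter]; simp only [List.all_cons, hcx, hdx, Bool.true_and]; exact hat,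
                      fun a => ?_⟩
              rw [hfilter]
              simp only [List.foldl_cons, hcv, hdv]
              rw [hpt ((a * 16 + hi) * 16 + lo), fromBytes_cons]
              simp only [List.length_cons, pow_succ]
              ring

theorem strip_parse (cs : List Char) (bs : List Nat) (h : pvFromHex? cs = some bs) :
    (cs.filter (fun c => !pvIsWs c)).length = 2 * bs.length ∧
    (cs.filter (fun c => !pvIsWs c)).all pvIsHexDigitB = true ∧
    (cs.filter (fun c => !pvIsWs c)).foldl (fun m c => m * 16 + pvNibValB c) 0 =
      pvIntFromBytesBE bs := by
  obtain ⟨hl, ha, hp⟩ := strip_parse_aux cs.length cs le_rfl bs h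
  refine ⟨hl, ha, ?_⟩
  rw [hp 0]
  simp

-- ===== VERDICT (by name: the statement is the Claim_ definition above) =====
theorem hamming_distance_hex_spec : Claim_equal_hamming_distance_hex := by
  intro h1 h2 _ hpre
  obtain ⟨hp1, hp2⟩ := hpre
  rw [validHex_eq] at hp1 hp2
  unfold Spec_hamming_distance_hex hamming_distance_hex hamming_distance_hex_alt
  rcases e1 : pvFromHex? h1.toList with _ | b1
  · simp [e1] at hp1
  rcases e2 : pvFromHex? h2.toList with _ | b2
  · simp [e2] at hp2
  obtain ⟨hl1, ha1, hq1⟩ := strip_parse h1.toList b1 e1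
  obtain ⟨hl2, ha2, hq2⟩ := strip_parse h2.toList b2 e2
  simp only [hl1, hl2, ha1, ha2, hq1, hq2, Nat.mul_mod_right, bne_self_eq_false,
    Bool.not_true, Bool.or_self,
    Nat.mul_div_cancel_left _ (by norm_num : (0:Nat) < 2)]
  have hb1 := fromHex_bytes_lt h1.toList b1 e1
  have hb2 := fromHex_bytes_lt h2.toList b2 e2
  set L := max b1.length b2.length with hL
  have hlen : (b1 ++ List.replicate (L - b1.length) 0).length =
      (b2 ++ List.replicate (L - b2.length) 0).length := by
    simp [List.length_append, List.length_replicate]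
    omega
  have hlt1 : ∀ b ∈ b1 ++ List.replicate (L - b1.length) 0, b < 256 := by
    intro b hb
    rcases List.mem_append.mp hb with h | h
    · exact hb1 b h
    · have := List.eq_of_mem_replicate h; omega
  have hlt2 : ∀ b ∈ b2 ++ List.replicate (L - b2.length) 0, b < 256 := by
    intro b hb
    rcases List.mem_append.mp hb with h | h
    · exact hb2 b h
    · have := List.eq_of_mem_replicate h; omega
  rw [foldl_count_eq_sum, zip_popcount_eq _ _ hlen hlt1 hlt2]
  rw [fromBytes_pad, fromBytes_pad, Nat.shiftLeft_eq, Nat.shiftLeft_eq, ← pow256, ← pow256]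
  simp
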